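-- pv_equiv track=rewrite | github.com/chloeeekim/TIL | Algorithm/Programmers/Python/161989.py | solution
-- ===== SOURCE A (Python) =====
-- from collections import deque
--
-- def solution(n, m, section):
--     answer = 0
--     wall = deque([s for s in section])
--
--     while wall:
--         start = wall.popleft()
--         answer += 1
--         while wall:
--             if wall[0] <= start + m - 1:
--                 wall.popleft()
--             else:
--                 break
--
--     return answer
-- ===== SOURCE B (Python) =====
-- def solution(n, m, section):
--     answer = 0
--     painted = None  # exclusive end of the last painted span
--     for s in section:
--         if painted is None or s >= painted:
--             answer += 1
--             painted = s + m
--     return answer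
-- ===== Notes on version B (the rewrite author's own statement) =====
-- stated objective: simpler
-- what changed: Replaced the deque with its nested popleft skip-loop by one flat for-loop over section maintaining a scalar 'painted' boundary (the exclusive end of the current roller span); no deque allocation or per-element popleft.
import Mathlib
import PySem

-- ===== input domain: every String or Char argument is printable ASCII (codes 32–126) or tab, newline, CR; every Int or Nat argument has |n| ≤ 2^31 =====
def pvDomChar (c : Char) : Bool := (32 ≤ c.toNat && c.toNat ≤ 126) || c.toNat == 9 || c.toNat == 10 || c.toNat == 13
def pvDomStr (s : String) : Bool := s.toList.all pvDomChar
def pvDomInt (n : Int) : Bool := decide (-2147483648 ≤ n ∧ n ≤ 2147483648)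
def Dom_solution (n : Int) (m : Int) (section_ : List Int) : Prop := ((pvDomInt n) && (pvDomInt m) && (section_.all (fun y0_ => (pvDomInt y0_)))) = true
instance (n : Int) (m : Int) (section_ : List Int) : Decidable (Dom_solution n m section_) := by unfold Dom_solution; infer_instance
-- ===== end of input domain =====

-- B replaces A's deque and nested skip loop by one flat pass keeping a scalar
-- painted-boundary; objective: simpler.

-- ===== PORT A =====
-- inner while loop: pop while head ≤ start + m - 1
def skipA (m : Int) (start : Int) : List Int → List Int
  | [] => []
  | x :: xs => if x ≤ start + m - 1 then skipA m start xs else x :: xs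

theorem skipA_length_le (m start : Int) (xs : List Int) : (skipA m start xs).length ≤ xs.length := by
  induction xs with
  | nil => simp [skipA]
  | cons x xs ih =>
    simp only [skipA]
    split
    · exact Nat.le_succ_of_le ih
    · simp

-- outer while loop over the deque, accumulating answer
def loopA (m : Int) : List Int → Int → Int
  | [], answer => answer
  | start :: wall, answer => loopA m (skipA m start wall) (answer + 1)
termination_by wall => wall.length
decreasing_by exact Nat.lt_succ_of_le (skipA_length_le m start wall)

def solution (n : Int) (m : Int) (section_ : List Int) : Int := loopA m section_ 0

-- ===== PORT B =====
-- flat for-loop with scalar boundary 'painted' (Option Int for the initial None)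
def loopB (m : Int) : List Int → Option Int → Int → Int
  | [], _, answer => answer
  | s :: rest, painted, answer =>
    if (match painted with | none => true | some p => p ≤ s) then
      loopB m rest (some (s + m)) (answer + 1)
    else
      loopB m rest painted answer

def solution_alt (n : Int) (m : Int) (section_ : List Int) : Int := loopB m section_ none 0

-- ===== PRECONDITION & SPEC =====
def Spec_solution (n : Int) (m : Int) (section_ : List Int) (out : Int) : Prop := out = solution_alt n m section_
instance (n : Int) (m : Int) (section_ : List Int) (out : Int) : Decidable (Spec_solution n m section_ out) := by unfold Spec_solution; infer_instance

-- ===== CLAIM (what is proved, stated in full; the proofs are below) =====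
def Claim_equal_solution : Prop := ∀ (n : Int) (m : Int) (section_ : List Int), Dom_solution n m section_ → Spec_solution n m section_ (solution n m section_)

-- ===== LEMMAS AND PROOFS =====

-- ===== VERDICT (by name: the statement is the Claim_ definition above) =====
theorem loopB_eq_loopA (m : Int) (xs : List Int) : ∀ (start answer : Int),
    loopB m xs (some (start + m)) answer = loopA m (skipA m start xs) answer := by
  induction xs with
  | nil => intro start answer; simp [loopB, skipA, loopA]
  | cons x xs ih =>
    intro start answer
    simp only [loopB, skipA]
    by_cases h : x ≤ start + m - 1
    · rw [if_neg (by simp only [decide_eq_true_eq]; omega), if_pos h, ih]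
    · rw [if_pos (by simp only [decide_eq_true_eq]; omega), if_neg h, loopA, ih]

theorem solution_spec : Claim_equal_solution := by
  intro n m section_ _
  unfold Spec_solution solution solution_alt
  cases section_ with
  | nil => simp [loopA, loopB]
  | cons x xs =>
    simp only [loopA, loopB]
    exact (loopB_eq_loopA m xs x 1).symm
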